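-- pv_equiv track=rewrite | github.com/BeBoop-Beep/EVRCalculator | backend/Scraper/clients/tcgplayer_client.py | _is_helper_or_metadata_url
-- ===== SOURCE A (Python) =====
-- def _is_helper_or_metadata_url(url: str) -> bool:
--     lowered = (url or "").lower()
--     helper_markers = (
--         "search",
--         "metadata",
--         "index",
--         "category",
--         "navigation",
--         "catalog",
--         "discovery",
--     )
--     return any(marker in lowered for marker in helper_markers)
-- ===== SOURCE B (Python) =====
-- _MARKERS_BY_FIRST = {
--     "s": ("search",),
--     "m": ("metadata",),
--     "i": ("index",),
--     "c": ("category", "catalog"),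
--     "n": ("navigation",),
--     "d": ("discovery",),
-- }
--
--
-- def _is_helper_or_metadata_url(url: str) -> bool:
--     # One left-to-right pass: at each position, try only the markers that
--     # start with the current character, instead of seven independent scans.
--     lowered = (url or "").lower()
--     for i, ch in enumerate(lowered):
--         for marker in _MARKERS_BY_FIRST.get(ch, ()):
--             if lowered.startswith(marker, i):
--                 return True
--     return False
-- ===== Notes on version B (the rewrite author's own statement) =====
-- stated objective: alternative
-- what changed: Replaces the seven independent per-marker substring scans with a single left-to-right pass over the lowered URL that at each position tries only the markers dispatched by their first character.
import Mathlib
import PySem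

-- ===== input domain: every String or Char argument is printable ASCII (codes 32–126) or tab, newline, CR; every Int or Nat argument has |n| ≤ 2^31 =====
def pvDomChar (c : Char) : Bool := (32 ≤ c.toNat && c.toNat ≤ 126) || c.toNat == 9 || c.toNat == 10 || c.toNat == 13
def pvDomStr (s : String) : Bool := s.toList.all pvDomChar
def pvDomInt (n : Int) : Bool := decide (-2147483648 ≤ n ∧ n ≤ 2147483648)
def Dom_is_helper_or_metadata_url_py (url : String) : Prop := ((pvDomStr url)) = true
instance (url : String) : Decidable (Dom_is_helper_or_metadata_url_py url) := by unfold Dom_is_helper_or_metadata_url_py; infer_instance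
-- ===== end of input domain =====

-- B replaces A's seven independent `marker in lowered` substring scans by a single
-- left-to-right pass that, at each position, tries only the markers starting with the
-- current character (first-letter dispatch); objective: alternative single-pass algorithm.

-- ===== PORT A =====
def pvHelperMarkers : List String :=
  ["search", "metadata", "index", "category", "navigation", "catalog", "discovery"]

def is_helper_or_metadata_url_py (url : String) : Bool :=
  let lowered := PySem.Str.lower (if url == "" then "" else url)
  pvHelperMarkers.any (fun marker => PySem.Str.isIn marker lowered)

-- ===== PORT B =====
def pvMarkersFor (c : Char) : List (List Char) :=
  if c = 's' then ["search".toList]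
  else if c = 'm' then ["metadata".toList]
  else if c = 'i' then ["index".toList]
  else if c = 'c' then ["category".toList, "catalog".toList]
  else if c = 'n' then ["navigation".toList]
  else if c = 'd' then ["discovery".toList]
  else []

def pvScan : List Char → Bool
  | [] => false
  | c :: rest =>
      (pvMarkersFor c).any (fun m => PySem.Chars.startswith (c :: rest) m) || pvScan rest

def is_helper_or_metadata_url_py_alt (url : String) : Bool :=
  let lowered := PySem.Str.lower (if url == "" then "" else url)
  pvScan lowered.toList

-- ===== PRECONDITION & SPEC =====
def Spec_is_helper_or_metadata_url_py (url : String) (out : Bool) : Prop := out = is_helper_or_metadata_url_py_alt url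
instance (url : String) (out : Bool) : Decidable (Spec_is_helper_or_metadata_url_py url out) := by unfold Spec_is_helper_or_metadata_url_py; infer_instance

-- ===== CLAIM (what is proved, stated in full; the proofs are below) =====
def Claim_equal_is_helper_or_metadata_url_py : Prop := ∀ (url : String), Dom_is_helper_or_metadata_url_py url → Spec_is_helper_or_metadata_url_py url (is_helper_or_metadata_url_py url)

-- ===== LEMMAS AND PROOFS =====

theorem pvL_search : "search".toList = ['s', 'e', 'a', 'r', 'c', 'h'] := rfl
theorem pvL_metadata : "metadata".toList = ['m', 'e', 't', 'a', 'd', 'a', 't', 'a'] := rfl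
theorem pvL_index : "index".toList = ['i', 'n', 'd', 'e', 'x'] := rfl
theorem pvL_category : "category".toList = ['c', 'a', 't', 'e', 'g', 'o', 'r', 'y'] := rfl
theorem pvL_navigation : "navigation".toList = ['n', 'a', 'v', 'i', 'g', 'a', 't', 'i', 'o', 'n'] := rfl
theorem pvL_catalog : "catalog".toList = ['c', 'a', 't', 'a', 'l', 'o', 'g'] := rfl
theorem pvL_discovery : "discovery".toList = ['d', 'i', 's', 'c', 'o', 'v', 'e', 'r', 'y'] := rfl

theorem pv_isIn_cons (m s : List Char) (c : Char) :
    PySem.Chars.isIn m (c :: s)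
      = (PySem.Chars.startswith (c :: s) m || PySem.Chars.isIn m s) := by
  rw [Bool.eq_iff_iff]
  simp [PySem.Chars.isIn_iff_infix, PySem.Chars.startswith_iff, List.infix_cons_iff,
    Bool.or_eq_true]

set_option maxHeartbeats 1000000 in
set_option maxRecDepth 4000 in
theorem pv_dispatch (c : Char) (rest : List Char) :
    (pvMarkersFor c).any (fun m => PySem.Chars.startswith (c :: rest) m)
      = (pvHelperMarkers.map String.toList).any (fun m => PySem.Chars.startswith (c :: rest) m) := by
  simp only [pvMarkersFor, pvHelperMarkers, List.map, List.any_cons, List.any_nil]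
  simp only [pvL_search, pvL_metadata, pvL_index, pvL_category, pvL_navigation,
    pvL_catalog, pvL_discovery]
  split_ifs with h1 h2 h3 h4 h5 h6 <;>
    simp_all [PySem.Chars.startswith, List.isPrefixOf, Bool.or_comm]
  exact ⟨fun h => absurd h.symm h1, fun h => absurd h.symm h2, fun h => absurd h.symm h3,
    fun h => absurd h.symm h4, fun h => absurd h.symm h5, fun h => absurd h.symm h4,
    fun h => absurd h.symm h6⟩

theorem pv_scan_eq (s : List Char) :
    pvScan s = (pvHelperMarkers.map String.toList).any (fun m => PySem.Chars.isIn m s) := by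
  induction s with
  | nil => simp [pvScan]; decide
  | cons c rest ih =>
      rw [pvScan, pv_dispatch, ih]
      simp only [pvHelperMarkers, List.map, List.any_cons, List.any_nil, pv_isIn_cons,
        pvL_search, pvL_metadata, pvL_index, pvL_category, pvL_navigation,
        pvL_catalog, pvL_discovery, Bool.or_false]
      ac_rfl

-- ===== VERDICT (by name: the statement is the Claim_ definition above) =====
theorem is_helper_or_metadata_url_py_spec : Claim_equal_is_helper_or_metadata_url_py := by
  intro url _
  show _ = _
  unfold is_helper_or_metadata_url_py is_helper_or_metadata_url_py_alt
  rw [pv_scan_eq]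
  simp [pvHelperMarkers]
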